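-- pv_equiv track=rewrite | github.com/mlapinm/b81py | b11052deep/b06client.py | strs_to_json
-- ===== SOURCE A (Python) =====
-- def strs_to_json(s):
--     obj = {}
--     ss = s.split('\n')
--     ss = [e.split(' ') for e in ss if len(e.split(' ')) == 3]
--     obj = {}
--     for e in ss:
--         l = obj.get(e[0], [])
--         l.append((e[1], e[2]))
--         obj[e[0]] = l
--     return obj
-- ===== SOURCE B (Python) =====
-- def strs_to_json(s):
--     def parse(line):
--         t = line.split(' ')
--         return t if len(t) == 3 else None
--     triples = [t for t in map(parse, s.split('\n')) if t is not None]
--     def group(ts):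
--         if not ts:
--             return {}
--         k = ts[0][0]
--         d = {k: [(t[1], t[2]) for t in ts if t[0] == k]}
--         d.update(group([t for t in ts if t[0] != k]))
--         return d
--     return group(triples)
-- ===== Notes on version B (the rewrite author's own statement) =====
-- stated objective: alternative
-- what changed: A builds the dict in one pass mutating a per-key accumulator; B parses lines with a filtering map and then groups by recursive partitioning: take the first remaining key, collect its pairs by one filter, recurse on the triples with that key removed.
import Mathlib
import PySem

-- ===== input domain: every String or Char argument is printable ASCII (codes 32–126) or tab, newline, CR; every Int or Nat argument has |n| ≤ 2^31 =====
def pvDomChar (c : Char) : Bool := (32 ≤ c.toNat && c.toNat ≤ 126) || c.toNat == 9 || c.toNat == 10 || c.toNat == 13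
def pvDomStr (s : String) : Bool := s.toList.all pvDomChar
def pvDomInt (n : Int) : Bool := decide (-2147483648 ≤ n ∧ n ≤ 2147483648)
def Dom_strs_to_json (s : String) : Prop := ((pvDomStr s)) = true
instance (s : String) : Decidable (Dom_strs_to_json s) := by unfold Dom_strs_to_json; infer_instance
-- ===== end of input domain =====

-- B replaces A's one-pass dict mutation by a filtering parse plus recursive partition-by-first-key grouping (alternative decomposition, same results).

-- ===== PORT A =====
-- s.split('\n') / e.split(' '): sep is a nonempty literal, so PySem.Str.split? is always `some`; `.getD []` only unwraps.
-- e[0], e[1], e[2]: e has length 3 by the filter, so List.getD is exact for these indices.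
def strs_to_json (s : String) : List (String × List (String × String)) :=
  let ss := (PySem.Str.split? s "\n").getD []
  let ts := (ss.filter (fun e => ((PySem.Str.split? e " ").getD []).length == 3)).map
              (fun e => (PySem.Str.split? e " ").getD [])
  -- for e in ss: l = obj.get(e[0], []); l.append((e[1], e[2])); obj[e[0]] = l
  (ts.foldl (fun obj e =>
      obj.insert (e.getD 0 "") (obj.getD (e.getD 0 "") [] ++ [(e.getD 1 "", e.getD 2 "")]))
    PySem.Dict.empty).items

-- ===== PORT B =====
-- parse(line): the 3-token split or None
def pvParse (line : String) : Option (List String) :=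
  let t := (PySem.Str.split? line " ").getD []
  if t.length = 3 then some t else none

-- group(ts): first key's group, then recurse on the triples whose key differs
def pvGroup : List (List String) → List (String × List (String × String))
  | [] => []
  | t0 :: rest =>
    let k := t0.getD 0 ""
    (k, ((t0 :: rest).filter (fun t => t.getD 0 "" == k)).map
          (fun t => (t.getD 1 "", t.getD 2 ""))) ::
      pvGroup ((t0 :: rest).filter (fun t => !(t.getD 0 "" == k)))
termination_by ts => ts.length
decreasing_by
  simp only [List.filter_cons, beq_self_eq_true, Bool.not_true, Bool.false_eq_true, if_false,
    List.length_cons]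
  have := List.length_filter_le (fun t => !(t.getD 0 "" == t0.getD 0 "")) rest
  omega

def strs_to_json_alt (s : String) : List (String × List (String × String)) :=
  let triples := ((PySem.Str.split? s "\n").getD []).filterMap pvParse
  pvGroup triples

-- ===== PRECONDITION & SPEC =====
def Spec_strs_to_json (s : String) (out : List (String × List (String × String))) : Prop := out = strs_to_json_alt s
instance (s : String) (out : List (String × List (String × String))) : Decidable (Spec_strs_to_json s out) := by unfold Spec_strs_to_json; infer_instance

-- ===== CLAIM (what is proved, stated in full; the proofs are below) =====
def Claim_equal_strs_to_json : Prop := ∀ (s : String), Dom_strs_to_json s → Spec_strs_to_json s (strs_to_json s)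

-- ===== LEMMAS AND PROOFS =====

-- The grouping loop of A, over ANY list of triples, yields exactly the dedup-then-filter table.
theorem grouped_items (ts : List (List String)) :
    (ts.foldl (fun obj e =>
        obj.insert (e.getD 0 "") (obj.getD (e.getD 0 "") [] ++ [(e.getD 1 "", e.getD 2 "")]))
      PySem.Dict.empty).items
    = (PySem.List.dedup (ts.map (fun t => t.getD 0 ""))).map (fun k =>
        (k, (ts.filter (fun t => t.getD 0 "" == k)).map (fun t => (t.getD 1 "", t.getD 2 "")))) := by
  have hfold :
      (ts.foldl (fun obj e =>
          obj.insert (e.getD 0 "") (obj.getD (e.getD 0 "") [] ++ [(e.getD 1 "", e.getD 2 "")]))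
        PySem.Dict.empty)
      = ((ts.map (fun e => (e.getD 0 "", (e.getD 1 "", e.getD 2 "")))).foldl
          (fun obj p => obj.modify p.1 [] (· ++ [p.2])) PySem.Dict.empty) := by
    rw [List.foldl_map]
    exact PySem.List.foldl_congr_mem _ _ _ _ (fun acc e _ => rfl)
  rw [hfold]
  set d := ((ts.map (fun e => (e.getD 0 "", (e.getD 1 "", e.getD 2 "")))).foldl
      (fun obj p => obj.modify p.1 [] (· ++ [p.2])) PySem.Dict.empty) with hd
  have hnd : d.keys.Nodup := by
    rw [hd]
    exact PySem.Dict.nodup_keys_foldl_modify_key _ Prod.fst [] (fun d p => (· ++ [p.2])) _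
      PySem.Dict.nodup_keys_empty
  rw [PySem.Dict.items_eq_map_keys d hnd []]
  have hkeys : d.keys = PySem.List.dedup (ts.map (fun t => t.getD 0 "")) := by
    rw [hd, PySem.Dict.keys_foldl_modify_key]
    simp [PySem.Dict.keys_empty, PySem.List.dedup_eq_ofList, PySem.Set.update, PySem.Set.ofList_eq_foldl,
      List.map_map, Function.comp_def]
  rw [hkeys]
  refine List.map_congr_left (fun k hk => ?_)
  have hget : d.getD k [] =
      (ts.filter (fun t => t.getD 0 "" == k)).map (fun t => (t.getD 1 "", t.getD 2 "")) := by
    rw [hd, PySem.Dict.getD_foldl_modify_append]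
    simp [PySem.Dict.getD_empty, List.filter_map, List.map_map, Function.comp_def]
  rw [hget]

-- Set.add keeps an already-present element's position: fold over elements all ≠ a commutes with cons
theorem foldl_add_cons {α : Type} [BEq α] [LawfulBEq α] (l : List α) (s : List α) (a : α)
    (h : ∀ y ∈ l, y ≠ a) :
    List.foldl PySem.Set.add (a :: s) l = a :: List.foldl PySem.Set.add s l := by
  induction l generalizing s with
  | nil => rfl
  | cons y l ih =>
    have hy : y ≠ a := h y (by simp)
    simp only [List.foldl_cons]
    have hadd : PySem.Set.add (a :: s) y = a :: PySem.Set.add s y := by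
      simp [PySem.Set.add, PySem.Set.contains, List.contains_cons, hy, Ne.symm hy]
      split_ifs <;> simp_all
    rw [hadd, ih _ (fun z hz => h z (by simp [hz]))]

-- folding a list over Set.add ignores elements already in the accumulator
theorem foldl_add_filter {α : Type} [BEq α] [LawfulBEq α] (l : List α) (s : List α) (a : α)
    (h : a ∈ s) :
    List.foldl PySem.Set.add s l = List.foldl PySem.Set.add s (l.filter (fun y => !(y == a))) := by
  induction l generalizing s with
  | nil => rfl
  | cons y l ih =>
    by_cases hy : y = a
    · subst hy
      have hs : PySem.Set.add s y = s := by
        simp [PySem.Set.add, PySem.Set.contains]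
        simp [h]
      rw [List.filter_cons, if_neg (by simp), List.foldl_cons, hs]
      exact ih s h
    · have hmem : a ∈ PySem.Set.add s y := by
        simp [PySem.Set.add]; split_ifs <;> simp [h]
      rw [List.filter_cons, if_pos (by simp [hy]), List.foldl_cons, List.foldl_cons]
      exact ih _ hmem

-- dedup's head-recursion equation
theorem dedup_cons {α : Type} [BEq α] [LawfulBEq α] (x : α) (l : List α) :
    PySem.List.dedup (x :: l) = x :: PySem.List.dedup (l.filter (fun y => !(y == x))) := by
  show List.foldl PySem.Set.add PySem.Set.empty (x :: l) = _
  simp only [List.foldl_cons]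
  have h1 : PySem.Set.add PySem.Set.empty x = [x] := rfl
  rw [h1, foldl_add_filter l [x] x (by simp)]
  rw [foldl_add_cons _ [] x (by intro y hy; simp at hy; exact fun h => by simp [h] at hy)]
  rfl

-- B's recursive partition grouping equals the dedup-then-filter table.
theorem pvGroup_eq (ts : List (List String)) :
    pvGroup ts
    = (PySem.List.dedup (ts.map (fun t => t.getD 0 ""))).map (fun k =>
        (k, (ts.filter (fun t => t.getD 0 "" == k)).map (fun t => (t.getD 1 "", t.getD 2 "")))) := by
  induction hn : ts.length using Nat.strong_induction_on generalizing ts with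
  | _ n ih =>
    match ts with
    | [] => rw [pvGroup]; simp [PySem.List.dedup, PySem.Set.ofList]
    | t0 :: rest =>
      rw [pvGroup]
      set k := t0.getD 0 "" with hk
      have h0 : t0.getD 0 "" = k := rfl
      have hlen : ((t0 :: rest).filter (fun t => !(t.getD 0 "" == k))).length < n := by
        subst hn
        rw [List.filter_cons, if_neg (by rw [h0]; simp)]
        have := List.length_filter_le (fun t => !(t.getD 0 "" == k)) rest
        simp only [List.length_cons]
        omega
      rw [ih _ hlen _ rfl]
      -- rewrite the key list on the right
      have hmapcons : (t0 :: rest).map (fun t => t.getD 0 "") = k :: rest.map (fun t => t.getD 0 "") := rfl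
      rw [hmapcons, dedup_cons]
      have hfm : (rest.map (fun t => t.getD 0 "")).filter (fun y => !(y == k))
          = (((t0 :: rest).filter (fun t => !(t.getD 0 "" == k))).map (fun t => t.getD 0 "")) := by
        rw [List.filter_cons, if_neg (by rw [h0]; simp)]
        simp [List.filter_map, Function.comp_def]
      rw [List.map_cons, hfm]
      congr 1
      refine List.map_congr_left (fun k' hk' => ?_)
      have hk'ne : k' ≠ k := by
        rw [PySem.List.mem_dedup] at hk'
        obtain ⟨t, ht, rfl⟩ := List.mem_map.mp hk'
        have := List.of_mem_filter ht
        simpa using this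
      have hff : ((t0 :: rest).filter (fun t => !(t.getD 0 "" == k))).filter
            (fun t => t.getD 0 "" == k')
          = (t0 :: rest).filter (fun t => t.getD 0 "" == k') := by
        rw [List.filter_filter]
        refine List.filter_congr (fun t _ => ?_)
        by_cases h : t.getD 0 "" = k' <;>
          simp only [List.getD_eq_getElem?_getD] at h <;> simp [h, hk'ne]
      rw [hff]

-- B's filtering parse equals A's filter-then-map parse.
theorem parse_eq (ss : List String) :
    ss.filterMap pvParse
    = (ss.filter (fun e => ((PySem.Str.split? e " ").getD []).length == 3)).map
        (fun e => (PySem.Str.split? e " ").getD []) := by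
  induction ss with
  | nil => rfl
  | cons e ss ih =>
    have hp : pvParse e = if ((PySem.Str.split? e " ").getD []).length = 3
        then some ((PySem.Str.split? e " ").getD []) else none := rfl
    rw [List.filterMap_cons, hp, List.filter_cons]
    by_cases h : ((PySem.Str.split? e " ").getD []).length = 3 <;> simp [h, ih]

-- ===== VERDICT (by name: the statement is the Claim_ definition above) =====
theorem strs_to_json_spec : Claim_equal_strs_to_json := by
  intro s _
  show strs_to_json s = strs_to_json_alt s
  unfold strs_to_json strs_to_json_alt
  rw [grouped_items, parse_eq, pvGroup_eq]
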